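-- pv_equiv track=rewrite | github.com/Epicmine901/Telegram | keyboards/inline/Menu.py | oson
-- ===== SOURCE A (Python) =====
-- def oson(x:list):
--     a=[]
--     temp={}
--     for i in x:
--         if "dev" in i[0]['text'].lower():
--             if temp:
--                 a.append([temp])
--             a.append(i)
--             temp = {}
--         elif temp:
--             a.append([temp,i[0]])
--             temp = {}
--         else:
--             temp = i[0]
--     if temp:
--         a.append([temp])
--     return a
-- ===== SOURCE B (Python) =====
-- def oson(x: list):
--     # index-based lookahead: consume one dev item whole, or pair up two
--     # consecutive non-dev items' first buttons; no pending-state accumulator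
--     a = []
--     i = 0
--     n = len(x)
--     while i < n:
--         item = x[i]
--         if "dev" in item[0]['text'].lower():
--             a.append(item)
--             i += 1
--         elif i + 1 < n and "dev" not in x[i + 1][0]['text'].lower():
--             a.append([item[0], x[i + 1][0]])
--             i += 2
--         else:
--             a.append([item[0]])
--             i += 1
--     return a
-- ===== Notes on version B (the rewrite author's own statement) =====
-- stated objective: simpler
-- what changed: Replaced the stateful pending-dict accumulator with flush logic by an index-based lookahead loop that consumes one dev item whole or pairs two consecutive non-dev items per step.
import Mathlib
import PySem

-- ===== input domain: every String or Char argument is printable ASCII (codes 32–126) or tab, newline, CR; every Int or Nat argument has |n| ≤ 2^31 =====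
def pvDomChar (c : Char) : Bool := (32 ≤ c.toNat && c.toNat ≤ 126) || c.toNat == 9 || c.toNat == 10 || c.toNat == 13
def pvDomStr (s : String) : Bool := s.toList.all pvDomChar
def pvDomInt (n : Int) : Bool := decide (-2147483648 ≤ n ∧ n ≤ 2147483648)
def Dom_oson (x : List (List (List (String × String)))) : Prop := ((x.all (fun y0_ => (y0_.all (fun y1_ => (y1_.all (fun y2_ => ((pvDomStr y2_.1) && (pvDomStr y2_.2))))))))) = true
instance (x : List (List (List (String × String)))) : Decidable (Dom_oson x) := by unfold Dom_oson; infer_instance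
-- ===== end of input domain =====

-- B replaces A's pending-dict accumulator and flush logic by an index lookahead loop (simpler); equivalence is about the return value only.

-- shared primitive steps: i[0] (IndexError → default outside Pre_), i[0]['text'] (first match; KeyError → default outside Pre_)
def pvHd (i : List (List (String × String))) : List (String × String) :=
  (PySem.List.pyGet? i 0).getD []
def pvTxt (i : List (List (String × String))) : String :=
  (((pvHd i).find? (fun p => p.1 == "text")).map (·.2)).getD ""
-- "dev" in i[0]['text'].lower()
def pvDev (i : List (List (String × String))) : Bool :=
  PySem.Str.isIn "dev" (PySem.Str.lower (pvTxt i))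

-- ===== PORT A =====
def osonStep (st : List (List (List (String × String))) × List (String × String))
    (i : List (List (String × String))) :
    List (List (List (String × String))) × List (String × String) :=
  if pvDev i then
    (if st.2.isEmpty then st.1 ++ [i] else st.1 ++ [[st.2], i], [])
  else if !st.2.isEmpty then
    (st.1 ++ [[st.2, pvHd i]], [])
  else
    (st.1, pvHd i)

def oson (x : List (List (List (String × String)))) : List (List (List (String × String))) :=
  let st := x.foldl osonStep ([], [])
  if st.2.isEmpty then st.1 else st.1 ++ [[st.2]]

-- ===== PORT B =====
def osonGo : List (List (List (String × String))) → List (List (List (String × String)))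
  | [] => []
  | [i] => if pvDev i then [i] else [[pvHd i]]
  | i :: j :: rest' =>
    if pvDev i then i :: osonGo (j :: rest')
    else if pvDev j then [pvHd i] :: osonGo (j :: rest')
    else [pvHd i, pvHd j] :: osonGo rest'

def oson_alt (x : List (List (List (String × String)))) : List (List (List (String × String))) :=
  osonGo x

-- ===== PRECONDITION & SPEC =====
-- Pre_ excludes exactly the inputs where the Python raises: an empty item i (IndexError on i[0])
-- or an item whose first dict has no "text" key (KeyError).
def pvOk (i : List (List (String × String))) : Bool :=
  !i.isEmpty && ((i.headD []).find? (fun p => p.1 == "text")).isSome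
def Pre_oson (x : List (List (List (String × String)))) : Prop := x.all pvOk = true
instance (x : List (List (List (String × String)))) : Decidable (Pre_oson x) := by unfold Pre_oson; infer_instance

def pvWitness_oson : (List (List (List (String × String)))) :=
  [[[("text", "Dev team")]], [[("text", "a")]], [[("text", "b")]], [[("text", "c")]]]

def Spec_oson (x : List (List (List (String × String)))) (out : List (List (List (String × String)))) : Prop := out = oson_alt x
instance (x : List (List (List (String × String)))) (out : List (List (List (String × String)))) : Decidable (Spec_oson x out) := by unfold Spec_oson; infer_instance

-- ===== CLAIM (what is proved, stated in full; the proofs are below) =====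
def Claim_equal_oson : Prop := ∀ (x : List (List (List (String × String)))), Dom_oson x → Pre_oson x → Spec_oson x (oson x)

-- ===== LEMMAS AND PROOFS =====

-- how A finishes from a fold state
def pvFinish (st : List (List (List (String × String))) × List (String × String)) :
    List (List (List (String × String))) :=
  if st.2.isEmpty then st.1 else st.1 ++ [[st.2]]

-- what A produces from a nonempty pending button t followed by the items l
def pvPair (t : List (String × String)) (l : List (List (List (String × String)))) :
    List (List (List (String × String))) :=
  match l with
  | [] => [[t]]
  | i :: r => if pvDev i then [t] :: osonGo (i :: r) else [t, pvHd i] :: osonGo r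

lemma pvOk_hd_ne_nil {i : List (List (String × String))} (h : pvOk i = true) :
    (pvHd i).isEmpty = false := by
  unfold pvOk at h
  simp only [Bool.and_eq_true, Bool.not_eq_true'] at h
  obtain ⟨h1, h2⟩ := h
  cases i with
  | nil => simp at h1
  | cons a l =>
    simp only [List.headD_cons] at h2
    unfold pvHd
    rw [PySem.List.pyGet?_zero_cons]
    simp only [Option.getD_some]
    cases a with
    | nil => simp [List.find?] at h2
    | cons _ _ => simp

lemma osonGo_nil : osonGo [] = [] := by simp [osonGo]

lemma osonGo_cons_dev (i : List (List (String × String)))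
    (r : List (List (List (String × String)))) (h : pvDev i = true) :
    osonGo (i :: r) = i :: osonGo r := by
  cases r with
  | nil => simp [osonGo, h]
  | cons j r' => simp [osonGo, h]

lemma go_cons_nondev (i : List (List (String × String)))
    (r : List (List (List (String × String)))) (h : pvDev i = false) :
    osonGo (i :: r) = pvPair (pvHd i) r := by
  cases r with
  | nil => simp [osonGo, pvPair, h]
  | cons j r' =>
    by_cases hj : pvDev j = true
    · simp [osonGo, pvPair, h, hj]
    · simp only [Bool.not_eq_true] at hj
      simp [osonGo, pvPair, h, hj]

lemma main_inv (l : List (List (List (String × String))))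
    (hok : ∀ i ∈ l, pvOk i = true) :
    ∀ (a : List (List (List (String × String)))) (t : List (String × String)),
      (t.isEmpty = true → pvFinish (l.foldl osonStep (a, t)) = a ++ osonGo l) ∧
      (t.isEmpty = false → pvFinish (l.foldl osonStep (a, t)) = a ++ pvPair t l) := by
  induction l with
  | nil =>
    intro a t
    constructor <;> intro ht <;> simp [pvFinish, pvPair, ht, osonGo_nil]
  | cons i r ih =>
    have hoki : pvOk i = true := hok i (by simp)
    have hokr : ∀ j ∈ r, pvOk j = true := fun j hj => hok j (by simp [hj])
    intro a t
    constructor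
    · intro ht
      by_cases hd : pvDev i = true
      · have : osonStep (a, t) i = (a ++ [i], []) := by
          simp [osonStep, hd, ht]
        simp only [List.foldl_cons, this]
        rw [(ih hokr (a ++ [i]) []).1 rfl, osonGo_cons_dev i r hd]
        simp
      · simp only [Bool.not_eq_true] at hd
        have : osonStep (a, t) i = (a, pvHd i) := by
          simp [osonStep, hd, ht]
        simp only [List.foldl_cons, this]
        rw [(ih hokr a (pvHd i)).2 (pvOk_hd_ne_nil hoki)]
        rw [go_cons_nondev i r hd]
    · intro ht
      by_cases hd : pvDev i = true
      · have : osonStep (a, t) i = (a ++ [[t], i], []) := by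
          simp [osonStep, hd, ht]
        simp only [List.foldl_cons, this]
        rw [(ih hokr (a ++ [[t], i]) []).1 rfl, pvPair, osonGo_cons_dev i r hd]
        simp [hd]
      · simp only [Bool.not_eq_true] at hd
        have : osonStep (a, t) i = (a ++ [[t, pvHd i]], []) := by
          simp [osonStep, hd, ht]
        simp only [List.foldl_cons, this]
        rw [(ih hokr (a ++ [[t, pvHd i]]) []).1 rfl]
        simp [pvPair, hd]

-- ===== VERDICT (by name: the statement is the Claim_ definition above) =====
theorem oson_spec : Claim_equal_oson := by
  intro x _hdom hpre
  unfold Spec_oson oson oson_alt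
  have hok : ∀ i ∈ x, pvOk i = true := by
    intro i hi
    exact List.all_eq_true.mp hpre i hi
  have h := (main_inv x hok [] []).1 rfl
  simpa [pvFinish] using h
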